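-- pv_equiv track=rewrite | github.com/MrBrantCode/unitest_baseline | mut_generate/mist_train_taco/taco_17952/solution.py | find_unique_most_powerful_lightsaber
-- ===== SOURCE A (Python) =====
-- def find_unique_most_powerful_lightsaber(N, powers):
--     # Dictionary to count occurrences of each power
--     power_count = {}
--
--     # Count the occurrences of each power
--     for power in powers:
--         if power in power_count:
--             power_count[power] += 1
--         else:
--             power_count[power] = 1
--
--     # List to store unique powers
--     unique_powers = []
--
--     # Collect powers that occur exactly once
--     for power in power_count:
--         if power_count[power] == 1:
--             unique_powers.append(power)
--
--     # If no unique powers, return -1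
--     if not unique_powers:
--         return -1
--
--     # Return the maximum of the unique powers
--     return max(unique_powers)
-- ===== SOURCE B (Python) =====
-- def find_unique_most_powerful_lightsaber(N, powers):
--     # Sort, then run-length scan: a value is unique iff its run has length 1.
--     # The scan goes in ascending order, so the last singleton seen is the maximum.
--     s = sorted(powers)
--     n = len(s)
--     best = -1
--     i = 0
--     while i < n:
--         j = i + 1
--         while j < n and s[j] == s[i]:
--             j += 1
--         if j == i + 1:
--             best = s[i]
--         i = j
--     return best
-- ===== Notes on version B (the rewrite author's own statement) =====
-- stated objective: alternative
-- what changed: Replaces the dict-counting loop, the collect-the-singletons loop and the guarded max call by sorting a copy and one run-length scan over the sorted list, where uniqueness is detected by adjacency and the running best is simply overwritten (ascending order makes the last singleton the maximum).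
import Mathlib
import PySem

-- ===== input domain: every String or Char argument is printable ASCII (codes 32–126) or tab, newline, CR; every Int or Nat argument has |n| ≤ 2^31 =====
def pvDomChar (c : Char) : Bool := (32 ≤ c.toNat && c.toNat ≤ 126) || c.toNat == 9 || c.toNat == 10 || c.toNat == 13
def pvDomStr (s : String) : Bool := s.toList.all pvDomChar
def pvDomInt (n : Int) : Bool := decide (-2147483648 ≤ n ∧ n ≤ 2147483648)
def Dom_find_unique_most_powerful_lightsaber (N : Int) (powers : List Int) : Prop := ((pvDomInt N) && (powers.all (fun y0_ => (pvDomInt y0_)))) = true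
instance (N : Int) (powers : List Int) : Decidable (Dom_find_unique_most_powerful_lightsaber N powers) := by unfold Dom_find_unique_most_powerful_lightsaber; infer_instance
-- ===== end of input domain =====

-- B sorts a copy and finds the maximal singleton by a run-length scan over the sorted list,
-- instead of A's dict counting + collect + max (alternative algorithm, similar cost).


-- ===== PORT A =====
def find_unique_most_powerful_lightsaber (N : Int) (powers : List Int) : Int :=
  -- count the occurrences of each power
  let power_count : PySem.Dict Int Int :=
    powers.foldl
      (fun d power =>
        if d.contains power then d.insert power (d.getD power 0 + 1)
        else d.insert power 1)
      PySem.Dict.empty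
  -- collect powers that occur exactly once (iterating the dict = iterating its keys)
  let unique_powers : List Int :=
    power_count.keys.foldl
      (fun acc power => if power_count.getD power 0 == 1 then acc ++ [power] else acc) []
  if unique_powers.isEmpty then -1
  else
    match PySem.List.max? unique_powers (fun y => y) with
    | some m => m
    | none => -1   -- unreachable: the list is nonempty here

-- ===== PORT B =====
-- Source B's outer while loop over the sorted list: the inner `while s[j] == s[i]` is the
-- takeWhile/dropWhile split of the current run; `best` is overwritten on runs of length 1.
def pvRunScan (best : Int) : List Int → Int
  | [] => best
  | x :: rest =>
      pvRunScan (if (rest.takeWhile (· == x)).isEmpty then x else best)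
        (rest.dropWhile (· == x))
termination_by l => l.length
decreasing_by
  simpa using Nat.lt_succ_of_le (List.Sublist.length_le (List.dropWhile_sublist _))

def find_unique_most_powerful_lightsaber_alt (N : Int) (powers : List Int) : Int :=
  pvRunScan (-1) (PySem.List.sorted powers (fun y => y) false)

-- ===== PRECONDITION & SPEC =====
def Spec_find_unique_most_powerful_lightsaber (N : Int) (powers : List Int) (out : Int) : Prop := out = find_unique_most_powerful_lightsaber_alt N powers
instance (N : Int) (powers : List Int) (out : Int) : Decidable (Spec_find_unique_most_powerful_lightsaber N powers out) := by unfold Spec_find_unique_most_powerful_lightsaber; infer_instance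

-- ===== CLAIM (what is proved, stated in full; the proofs are below) =====
def Claim_equal_find_unique_most_powerful_lightsaber : Prop := ∀ (N : Int) (powers : List Int), Dom_find_unique_most_powerful_lightsaber N powers → Spec_find_unique_most_powerful_lightsaber N powers (find_unique_most_powerful_lightsaber N powers)

-- ===== LEMMAS AND PROOFS =====

-- A dict that does not contain a key looks it up as none.
theorem pv_get?_eq_none_of_not_contains {κ ν : Type} [BEq κ] (d : PySem.Dict κ ν) (k : κ)
    (h : d.contains k = false) : d.get? k = none := by
  simp only [PySem.Dict.contains, List.any_eq_false] at h
  simp only [PySem.Dict.get?, Option.map_eq_none_iff, List.find?_eq_none]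
  exact h

-- A's counting loop builds exactly Counter(powers).
theorem pv_count_loop_eq_counter (powers : List Int) :
    powers.foldl
      (fun d power =>
        if d.contains power then d.insert power (d.getD power 0 + 1)
        else d.insert power 1)
      PySem.Dict.empty = PySem.Dict.counter powers := by
  have hf : (fun (d : PySem.Dict Int Int) power =>
        if d.contains power then d.insert power (d.getD power 0 + 1)
        else d.insert power 1)
      = fun d power => d.insert power (d.getD power 0 + 1) := by
    funext d power
    by_cases h : d.contains power = true
    · simp [h]
    · have h' : d.contains power = false := by simpa using h
      have : d.getD power 0 = 0 := by
        simp [PySem.Dict.getD, pv_get?_eq_none_of_not_contains d power h']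
      simp [h', this]
  rw [hf, PySem.Dict.foldl_insert_getD_add_one_eq_counter]

-- max with default only depends on which Ints are in the list.
theorem pv_maxD_congr_mem (l₁ l₂ : List Int) (h : ∀ x, x ∈ l₁ ↔ x ∈ l₂) (b : Int) :
    PySem.List.maxD l₁ (fun y => y) b = PySem.List.maxD l₂ (fun y => y) b := by
  unfold PySem.List.maxD
  cases hm₁ : PySem.List.max? l₁ (fun y => y) with
  | none =>
    cases hm₂ : PySem.List.max? l₂ (fun y => y) with
    | none => rfl
    | some m₂ =>
      have h1 : l₁ = [] := (PySem.List.max?_eq_none_iff _ _).mp hm₁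
      have : m₂ ∈ l₁ := (h m₂).mpr (PySem.List.max?_mem hm₂)
      simp [h1] at this
  | some m₁ =>
    cases hm₂ : PySem.List.max? l₂ (fun y => y) with
    | none =>
      have h2 : l₂ = [] := (PySem.List.max?_eq_none_iff _ _).mp hm₂
      have : m₁ ∈ l₂ := (h m₁).mp (PySem.List.max?_mem hm₁)
      simp [h2] at this
    | some m₂ =>
      have hle₁ : m₁ ≤ m₂ := PySem.List.max?_isMax hm₂ m₁ ((h m₁).mp (PySem.List.max?_mem hm₁))
      have hle₂ : m₂ ≤ m₁ := PySem.List.max?_isMax hm₁ m₂ ((h m₂).mpr (PySem.List.max?_mem hm₂))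
      simp [le_antisymm hle₁ hle₂]

-- Prepending an element smaller than everything in the list moves it into the default slot.
theorem pv_maxD_cons_lt (x : Int) (L : List Int) (hall : ∀ y ∈ L, x < y) (b : Int) :
    PySem.List.maxD (x :: L) (fun y => y) b = PySem.List.maxD L (fun y => y) x := by
  unfold PySem.List.maxD
  cases hm₂ : PySem.List.max? L (fun y => y) with
  | none =>
    have h2 : L = [] := (PySem.List.max?_eq_none_iff _ _).mp hm₂
    subst h2
    cases hm₁ : PySem.List.max? [x] (fun y => y) with
    | none => simp [PySem.List.max?_eq_none_iff] at hm₁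
    | some m => have := PySem.List.max?_mem hm₁; simp at this; simp [this]
  | some m₂ =>
    cases hm₁ : PySem.List.max? (x :: L) (fun y => y) with
    | none => simp [PySem.List.max?_eq_none_iff] at hm₁
    | some m₁ =>
      have hmem₁ : m₁ ∈ x :: L := PySem.List.max?_mem hm₁
      have hmem₂ : m₂ ∈ L := PySem.List.max?_mem hm₂
      have hle₂ : m₂ ≤ m₁ := PySem.List.max?_isMax hm₁ m₂ (List.mem_cons_of_mem _ hmem₂)
      rcases List.mem_cons.mp hmem₁ with hx | hL
      · exact absurd (hx ▸ hle₂) (not_le.mpr (hall m₂ hmem₂))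
      · have : m₁ = m₂ := le_antisymm (PySem.List.max?_isMax hm₂ m₁ hL) hle₂
        simp [this]

-- Every element of dropWhile (== x) of a ≤-sorted tail of x is strictly above x.
theorem pv_dropWhile_gt (x : Int) (rest : List Int)
    (hs : (x :: rest).Pairwise (· ≤ ·)) :
    ∀ y ∈ rest.dropWhile (· == x), x < y := by
  have hxle : ∀ y ∈ rest, x ≤ y := (List.pairwise_cons.mp hs).1
  have hpr : rest.Pairwise (· ≤ ·) := (List.pairwise_cons.mp hs).2
  intro y hy
  cases hd : rest.dropWhile (· == x) with
  | nil => rw [hd] at hy; simp at hy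
  | cons h t =>
    rw [hd] at hy
    have hne : rest.dropWhile (· == x) ≠ [] := by rw [hd]; simp
    have h1 := List.head_dropWhile_not (fun z => z == x) hne
    have hhead : (rest.dropWhile (· == x)).head hne = h := by simp [hd]
    rw [hhead] at h1
    have hhx : h ≠ x := by simpa using h1
    have hmemh : h ∈ rest := (List.dropWhile_sublist (· == x)).subset (hd ▸ List.mem_cons_self)
    have hxlt : x < h := lt_of_le_of_ne (hxle h hmemh) (Ne.symm hhx)
    have hpd : (h :: t).Pairwise (· ≤ ·) :=
      hd ▸ List.Pairwise.sublist (List.dropWhile_sublist (· == x)) hpr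
    rcases List.mem_cons.mp hy with rfl | hyt
    · exact hxlt
    · exact lt_of_lt_of_le hxlt ((List.pairwise_cons.mp hpd).1 y hyt)

-- The run-length scan over a sorted list computes max-with-default over its singletons.
theorem pv_runScan_eq_maxD (l : List Int) (hs : l.Pairwise (· ≤ ·)) (b : Int) :
    pvRunScan b l = PySem.List.maxD (l.filter (fun z => l.count z == 1)) (fun y => y) b := by
  induction hn : l.length using Nat.strong_induction_on generalizing l b with
  | _ n ih =>
  cases l with
  | nil => simp [pvRunScan, PySem.List.maxD, PySem.List.max?]
  | cons x rest =>
    set run := rest.takeWhile (· == x) with hrundef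
    set rest' := rest.dropWhile (· == x) with hrest'def
    set p : Int → Bool := fun z => (x :: rest).count z == 1 with hp
    have hgt : ∀ y ∈ rest', x < y := pv_dropWhile_gt x rest hs
    have hxnot : x ∉ rest' := fun h => lt_irrefl x (hgt x h)
    have hsplit : run ++ rest' = rest := List.takeWhile_append_dropWhile
    have hrunx : ∀ z ∈ run, z = x := by
      intro z hz; simpa using List.mem_takeWhile_imp hz
    have hcrun : ∀ y, y ≠ x → run.count y = 0 :=
      fun y hy => List.count_eq_zero.mpr (fun hm => hy (hrunx y hm))
    have hcx : (x :: rest).count x = run.length + 1 := by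
      rw [List.count_cons_self, ← hsplit, List.count_append,
        List.count_eq_zero.mpr hxnot, List.count_eq_length.mpr (fun b hb => (hrunx b hb).symm)]
    have hcy : ∀ y ∈ rest', (x :: rest).count y = rest'.count y := by
      intro y hy
      have hyx : y ≠ x := fun h => lt_irrefl x (h ▸ hgt y hy)
      rw [List.count_cons_of_ne hyx.symm, ← hsplit, List.count_append, hcrun y hyx]
      omega
    have hfrest' : rest'.filter p = rest'.filter (fun z => rest'.count z == 1) :=
      List.filter_congr (fun y hy => by simp only [hp]; rw [hcy y hy])
    have hfrun : run.filter p = [] := by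
      rw [List.filter_eq_nil_iff]
      intro z hz
      have hpos : 0 < run.length :=
        List.length_pos_iff.mpr (fun h => by rw [h] at hz; simp at hz)
      obtain rfl : z = x := hrunx z hz
      simp only [hp, hcx, beq_iff_eq]
      omega
    have hfilter : (x :: rest).filter p
        = (if run.isEmpty then [x] else []) ++ rest'.filter (fun z => rest'.count z == 1) := by
      rw [List.filter_cons, ← hsplit, List.filter_append, hfrun, List.nil_append, hfrest']
      by_cases hre : run.isEmpty
      · have h0 : run = [] := List.isEmpty_iff.mp hre
        have hpx : p x = true := by simp [hp, hcx, h0]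
        simp [hre, hpx]
      · have hpos : 0 < run.length :=
          List.length_pos_iff.mpr (by simpa [List.isEmpty_iff] using hre)
        have hpx : p x = false := by
          simp only [hp, hcx, beq_eq_false_iff_ne]
          omega
        simp [hre, hpx]
    have hpd : rest'.Pairwise (· ≤ ·) :=
      List.Pairwise.sublist (List.dropWhile_sublist (· == x)) (List.pairwise_cons.mp hs).2
    have hlen : rest'.length < n := by
      have h1 : rest'.length ≤ rest.length :=
        List.Sublist.length_le (List.dropWhile_sublist _)
      simp only [List.length_cons] at hn
      omega
    show pvRunScan b (x :: rest) = PySem.List.maxD ((x :: rest).filter p) (fun y => y) b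
    rw [pvRunScan, ih _ hlen rest' hpd _ rfl, hfilter]
    simp only [← hrundef]
    by_cases hre : run.isEmpty
    · simp only [hre, if_true, List.singleton_append]
      exact (pv_maxD_cons_lt x _ (fun y hy => hgt y (List.mem_filter.mp hy).1) b).symm
    · have hre' : run.isEmpty = false := by simpa using hre
      simp only [hre', Bool.false_eq_true, if_false, List.nil_append]

-- ===== VERDICT (by name: the statement is the Claim_ definition above) =====
theorem find_unique_most_powerful_lightsaber_spec : Claim_equal_find_unique_most_powerful_lightsaber := by
  intro N powers _
  unfold Spec_find_unique_most_powerful_lightsaber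
  unfold find_unique_most_powerful_lightsaber find_unique_most_powerful_lightsaber_alt
  rw [pv_count_loop_eq_counter]
  simp only [PySem.Dict.keys_counter, PySem.List.foldl_append_if_eq_filter, List.nil_append]
  set s : List Int := PySem.List.sorted powers (fun y => y) false with hsdef
  have hperm : s.Perm powers := by rw [hsdef]; exact PySem.List.sorted_perm _ _ _
  set lA : List Int :=
    List.filter (fun power => (PySem.Dict.counter powers).getD power 0 == 1)
      (PySem.Set.ofList powers) with hlA
  have hmem : ∀ x, x ∈ lA ↔ x ∈ s.filter (fun z => s.count z == 1) := by
    intro x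
    simp only [hlA, List.mem_filter, PySem.Set.mem_ofList, PySem.Dict.getD_counter, beq_iff_eq,
      hperm.mem_iff, hperm.count_eq]
    constructor
    · rintro ⟨hx, hc⟩; exact ⟨hx, by exact_mod_cast hc⟩
    · rintro ⟨hx, hc⟩; exact ⟨hx, by exact_mod_cast hc⟩
  rw [pv_runScan_eq_maxD s (by simpa [hsdef] using PySem.List.sorted_pairwise (xs := powers) (key := fun y => y)) (-1)]
  rw [← pv_maxD_congr_mem lA (s.filter (fun z => s.count z == 1)) hmem]
  unfold PySem.List.maxD
  cases hm : PySem.List.max? lA (fun y => y) with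
  | none =>
    have : lA = [] := (PySem.List.max?_eq_none_iff _ _).mp hm
    simp [this]
  | some m =>
    have : lA ≠ [] := by
      intro hnil
      rw [hnil] at hm
      simp [PySem.List.max?] at hm
    simp [List.isEmpty_iff, this]
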